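-- pv_equiv track=rewrite | github.com/Even012/unswcode | 2023 T1/9021/week2/quiz2.py | increasing_sequence_from
-- ===== SOURCE A (Python) =====
-- def increasing_sequence_from(n, L):
--     if n not in L:
--         return []
--     # INSERT YOUR CODE HERE
--     L2 = [n]
--     for i in range(len(L)):
--         if L[i] == n:
--             pos = i
--             break
--
--     val = n
--     for i in range(len(L)):
--         j = (pos + i) % len(L)
--         if L[j] > val:
--             L2.append(L[j])
--             val = L[j]
--     return L2
-- ===== SOURCE B (Python) =====
-- def increasing_sequence_from(n, L):
--     if n not in L:
--         return []
--     pos = L.index(n)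
--     rotated = L[pos:] + L[:pos]
--     # running-maximum table: pref[i] = max(rotated[:i+1])
--     pref = []
--     m = rotated[0]
--     for x in rotated:
--         m = x if x > m else m
--         pref.append(m)
--     # keep rotated[i] (i >= 1) exactly when it exceeds the max of everything before it
--     return [rotated[0]] + [x for x, p in zip(rotated[1:], pref) if x > p]
-- ===== Notes on version B (the rewrite author's own statement) =====
-- stated objective: alternative
-- what changed: Replaces the fused modular-index greedy scan (running max updated inside one loop over (pos+i)%len) by an explicit rotation L[pos:]+L[:pos], a separate running-maximum table pass, and a final zip-filter pass that keeps each element exceeding the max of everything before it.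
import Mathlib
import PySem

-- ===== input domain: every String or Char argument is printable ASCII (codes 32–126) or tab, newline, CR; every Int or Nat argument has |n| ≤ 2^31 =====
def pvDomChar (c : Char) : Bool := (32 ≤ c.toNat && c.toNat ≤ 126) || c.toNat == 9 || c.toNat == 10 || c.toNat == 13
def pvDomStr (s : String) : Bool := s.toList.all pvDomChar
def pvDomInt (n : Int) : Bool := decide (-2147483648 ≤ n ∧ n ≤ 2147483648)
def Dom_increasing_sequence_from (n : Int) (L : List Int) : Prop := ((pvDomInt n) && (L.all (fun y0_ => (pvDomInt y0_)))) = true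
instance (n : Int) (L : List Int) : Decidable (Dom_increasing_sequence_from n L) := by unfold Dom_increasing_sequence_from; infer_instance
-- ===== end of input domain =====

-- B rebuilds the same output via rotation + running-maximum table + zip-filter instead of A's
-- single modular-index greedy scan; alternative decomposition, same O(n) cost.

-- ===== PORT A =====
-- A's first loop: scan indices left to right, stop at the first element equal to n (break).
def pvPosA (n : Int) : List Int → Nat → Nat
  | [], k => k
  | x :: xs, k => if x == n then k else pvPosA n xs (k + 1)

def increasing_sequence_from (n : Int) (L : List Int) : List Int :=
  if n ∈ L then
    ((PySem.List.pyRange 0 (L.length : Int)).foldl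
      (fun (st : List Int × Int) i =>
        if PySem.List.pyGetD L (PySem.Int.mod ((pvPosA n L 0 : Int) + i) (L.length : Int)) 0 > st.2 then
          (st.1 ++ [PySem.List.pyGetD L (PySem.Int.mod ((pvPosA n L 0 : Int) + i) (L.length : Int)) 0],
           PySem.List.pyGetD L (PySem.Int.mod ((pvPosA n L 0 : Int) + i) (L.length : Int)) 0)
        else st)
      ([n], n)).1
  else []

-- ===== PORT B =====
-- B's table pass: m = x if x > m else m; pref.append(m)
def pvPrefMax (m : Int) : List Int → List Int
  | [] => []
  | x :: xs => (if x > m then x else m) :: pvPrefMax (if x > m then x else m) xs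

-- rotated = L[pos:] + L[:pos] with pos = L.index(n)
def pvRot (n : Int) (L : List Int) : List Int :=
  PySem.List.slice L (some (((PySem.List.index? L n).getD 0 : Nat) : Int)) none
    ++ PySem.List.slice L none (some (((PySem.List.index? L n).getD 0 : Nat) : Int))

def increasing_sequence_from_alt (n : Int) (L : List Int) : List Int :=
  if n ∈ L then
    [PySem.List.pyGetD (pvRot n L) 0 0] ++
      ((PySem.List.slice (pvRot n L) (some 1) none).zip
        (pvPrefMax (PySem.List.pyGetD (pvRot n L) 0 0) (pvRot n L))).filterMap
        (fun xp => if xp.1 > xp.2 then some xp.1 else none)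
  else []

-- ===== PRECONDITION & SPEC =====
def Spec_increasing_sequence_from (n : Int) (L : List Int) (out : List Int) : Prop := out = increasing_sequence_from_alt n L
instance (n : Int) (L : List Int) (out : List Int) : Decidable (Spec_increasing_sequence_from n L out) := by unfold Spec_increasing_sequence_from; infer_instance

-- ===== CLAIM (what is proved, stated in full; the proofs are below) =====
def Claim_equal_increasing_sequence_from : Prop := ∀ (n : Int) (L : List Int), Dom_increasing_sequence_from n L → Spec_increasing_sequence_from n L (increasing_sequence_from n L)

-- ===== LEMMAS AND PROOFS =====

-- the common greedy "strictly increasing running maxima" skeleton both programs compute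
def pvGreedy : List Int → Int → List Int
  | [], _ => []
  | x :: xs, v => if x > v then x :: pvGreedy xs x else pvGreedy xs v

theorem pvPosA_eq (n : Int) : ∀ (xs : List Int) (k : Nat), n ∈ xs →
    pvPosA n xs k = k + List.idxOf n xs := by
  intro xs
  induction xs with
  | nil => intro k h; cases h
  | cons x xs ih =>
    intro k h
    by_cases hx : x = n
    · simp [pvPosA, hx]
    · have hmem : n ∈ xs := by
        rcases List.mem_cons.mp h with h' | h'
        · exact absurd h'.symm hx
        · exact h'
      have hbeq : (x == n) = false := by simp [hx]
      simp [pvPosA, hbeq, ih (k + 1) hmem, List.idxOf_cons]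
      omega

theorem pvRotGetD (L : List Int) (p i : Nat) (hp : p < L.length) (hi : i < L.length) :
    (L.drop p ++ L.take p).getD i 0 = L.getD ((p + i) % L.length) 0 := by
  have hlen : (L.drop p).length = L.length - p := List.length_drop ..
  by_cases hc : p + i < L.length
  · have hm : (p + i) % L.length = p + i := Nat.mod_eq_of_lt hc
    have hi' : i < (L.drop p).length := by omega
    rw [hm, List.getD_eq_getElem?_getD, List.getD_eq_getElem?_getD,
        List.getElem?_append_left hi', List.getElem?_drop]
  · have hm : (p + i) % L.length = p + i - L.length := by
      rw [Nat.mod_eq_sub_mod (by omega), Nat.mod_eq_of_lt (by omega)]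
    have hi' : ¬ i < (L.drop p).length := by omega
    rw [hm, List.getD_eq_getElem?_getD, List.getD_eq_getElem?_getD,
        List.getElem?_append_right (by omega), List.getElem?_take]
    have : i - (L.drop p).length = p + i - L.length := by omega
    rw [this, if_pos (by omega)]

theorem pvFoldlGreedy : ∀ (xs : List Int) (acc : List Int) (v : Int),
    (xs.foldl (fun (st : List Int × Int) x => if x > st.2 then (st.1 ++ [x], x) else st) (acc, v)).1
      = acc ++ pvGreedy xs v := by
  intro xs
  induction xs with
  | nil => intro acc v; simp [pvGreedy]
  | cons x xs ih =>
    intro acc v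
    by_cases h : x > v
    · simp [pvGreedy, h, ih]
    · simp [pvGreedy, h, ih]

theorem pvZipPref : ∀ (xs : List Int) (m : Int),
    (xs.zip (m :: pvPrefMax m xs)).filterMap
        (fun xp => if xp.1 > xp.2 then some xp.1 else none)
      = pvGreedy xs m := by
  intro xs
  induction xs with
  | nil => intro m; simp [pvGreedy]
  | cons x xs ih =>
    intro m
    by_cases h : x > m
    · simp [pvPrefMax, pvGreedy, h, List.zip_cons_cons, ih]
    · simp [pvPrefMax, pvGreedy, h, List.zip_cons_cons, ih]

-- ===== VERDICT (by name: the statement is the Claim_ definition above) =====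
theorem increasing_sequence_from_spec : Claim_equal_increasing_sequence_from := by
  intro n L _
  unfold Spec_increasing_sequence_from increasing_sequence_from increasing_sequence_from_alt
  by_cases h : n ∈ L
  · simp only [if_pos h]
    -- the first occurrence position
    have hp : List.idxOf n L < L.length := List.idxOf_lt_length_of_mem h
    have hgetp : L[List.idxOf n L] = n := List.getElem_idxOf hp
    set p := List.idxOf n L with hpdef
    have hposA : pvPosA n L 0 = p := by simpa using pvPosA_eq n L 0 h
    have hidx : (PySem.List.index? L n).getD 0 = p := by
      obtain ⟨k, hk⟩ : ∃ k, List.idxOf? n L = some k := by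
        cases h' : List.idxOf? n L with
        | none => exact absurd h ((List.idxOf?_eq_none_iff).mp h')
        | some k => exact ⟨k, rfl⟩
      have hpk : p = k := by rw [hpdef, List.idxOf_eq_getD_idxOf?, hk]; rfl
      rw [PySem.List.index?_eq_idxOf?, hk, hpk]; rfl
    -- the rotation
    have hrot : pvRot n L = L.drop p ++ L.take p := by
      rw [pvRot, hidx, PySem.List.slice_from_natCast, PySem.List.slice_to_natCast]
    have hdrop : L.drop p = n :: L.drop (p + 1) := by
      rw [List.drop_eq_getElem_cons hp, hgetp]
    set t : List Int := L.drop (p + 1) ++ L.take p with htdef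
    have hrot' : pvRot n L = n :: t := by rw [hrot, hdrop]; rfl
    have hlenrot : (pvRot n L).length = L.length := by
      rw [hrot]; simp; omega
    have hlpos : 0 < L.length := List.length_pos_of_mem h
    -- A's loop body reads rotated[i]
    have hbody : ∀ (st : List Int × Int) (i : Int), i ∈ PySem.List.pyRange 0 (L.length : Int) →
        (if PySem.List.pyGetD L (PySem.Int.mod ((pvPosA n L 0 : Int) + i) (L.length : Int)) 0 > st.2 then
          (st.1 ++ [PySem.List.pyGetD L (PySem.Int.mod ((pvPosA n L 0 : Int) + i) (L.length : Int)) 0],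
           PySem.List.pyGetD L (PySem.Int.mod ((pvPosA n L 0 : Int) + i) (L.length : Int)) 0)
         else st)
        = (if PySem.List.pyGetD (pvRot n L) i 0 > st.2 then
            (st.1 ++ [PySem.List.pyGetD (pvRot n L) i 0], PySem.List.pyGetD (pvRot n L) i 0)
           else st) := by
      intro st i hi
      rw [PySem.List.mem_pyRange_one] at hi
      obtain ⟨hi0, hiL⟩ := hi
      have hk : i = ((i.toNat : Nat) : Int) := by omega
      have hkL : i.toNat < L.length := by omega
      have hval : PySem.List.pyGetD L (PySem.Int.mod ((pvPosA n L 0 : Int) + i) (L.length : Int)) 0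
          = PySem.List.pyGetD (pvRot n L) i 0 := by
        rw [hposA, hk, PySem.Int.mod_eq_emod_of_pos (by exact_mod_cast hlpos)]
        have hcast : ((p : Int) + (i.toNat : Int)) % (L.length : Int)
            = (((p + i.toNat) % L.length : Nat) : Int) := by push_cast; ring_nf
        rw [hcast, PySem.List.pyGetD_natCast, PySem.List.pyGetD_natCast, hrot,
            pvRotGetD L p i.toNat hp hkL]
      rw [hval]
    rw [PySem.List.foldl_congr_mem _ _ _ _ hbody]
    have hrange : PySem.List.pyRange 0 (L.length : Int) = PySem.List.pyRange 0 (PySem.List.len (pvRot n L)) := by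
      simp [PySem.List.len, hlenrot]
    rw [hrange,
        PySem.List.foldl_pyRange_pyGetD (pvRot n L) 0
          (fun (st : List Int × Int) x => if x > st.2 then (st.1 ++ [x], x) else st)
          ([n], n) (a := 0) le_rfl]
    simp only [Int.toNat_zero, List.drop_zero]
    rw [pvFoldlGreedy, hrot']
    have hg : pvGreedy (n :: t) n = pvGreedy t n := by simp [pvGreedy]
    have hr0 : PySem.List.pyGetD (n :: t) 0 0 = n := PySem.List.pyGetD_zero_cons ..
    rw [hg, hr0, PySem.List.slice_from_one]
    have hpref : pvPrefMax n (n :: t) = n :: pvPrefMax n t := by simp [pvPrefMax]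
    rw [hpref]
    simp only [List.tail_cons]
    rw [pvZipPref]
  · simp [h]
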